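-- pv_equiv track=rewrite | github.com/whobyphoenix/poetry | scripts/generate_epubs.py | text_to_html_preserving_spaces
-- ===== SOURCE A (Python) =====
-- def text_to_html_preserving_spaces(text):
--     """Convert poem text to HTML, preserving leading spaces and newlines.
--
--     Converts leading spaces on each line to &nbsp; entities to ensure they're
--     preserved in EPUB readers, and newlines to <br> tags.
--     """
--     if not text:
--         return ''
--
--     lines = text.split('\n')
--     html_lines = []
--
--     for line in lines:
--         # Count leading spaces
--         leading_spaces = len(line) - len(line.lstrip(' '))
--         if leading_spaces > 0:
--             # Replace leading spaces with &nbsp; entities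
--             html_line = '&nbsp;' * leading_spaces + line[leading_spaces:]
--         else:
--             html_line = line
--         html_lines.append(html_line)
--
--     # Join with <br> for line breaks
--     return '<br>\n'.join(html_lines)
-- ===== SOURCE B (Python) =====
-- def text_to_html_preserving_spaces(text):
--     """Convert poem text to HTML, preserving leading spaces and newlines.
--
--     Single character-scan state machine: no split/join, no per-line
--     counting pass.
--     """
--     if not text:
--         return ''
--     out = []
--     at_line_start = True
--     for ch in text:
--         if ch == '\n':
--             out.append('<br>\n')
--             at_line_start = True
--         elif at_line_start and ch == ' ':
--             out.append('&nbsp;')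
--         else:
--             out.append(ch)
--             at_line_start = False
--     return ''.join(out)
-- ===== Notes on version B (the rewrite author's own statement) =====
-- stated objective: alternative
-- what changed: Replaced the split('\n')/per-line leading-space counting/join pipeline with a single left-to-right character scan that tracks an at-line-start flag, emitting '&nbsp;', '<br>\n' or the character as it goes.
import Mathlib
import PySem

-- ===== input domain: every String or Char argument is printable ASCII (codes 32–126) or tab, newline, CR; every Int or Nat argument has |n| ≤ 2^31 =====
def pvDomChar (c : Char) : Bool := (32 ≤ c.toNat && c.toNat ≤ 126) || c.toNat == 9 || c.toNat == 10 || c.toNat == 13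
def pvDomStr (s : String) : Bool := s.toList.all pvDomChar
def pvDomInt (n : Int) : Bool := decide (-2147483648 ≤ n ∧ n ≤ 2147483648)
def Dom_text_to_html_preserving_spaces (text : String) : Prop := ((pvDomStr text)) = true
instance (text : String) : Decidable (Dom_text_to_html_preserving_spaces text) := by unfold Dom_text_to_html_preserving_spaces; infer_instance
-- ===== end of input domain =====

-- B replaces A's split('\n') / per-line leading-space count / join pipeline by a single
-- left-to-right character scan with an at-line-start flag (objective: alternative decomposition).

-- ===== PORT A =====
-- A's loop body: count the leading ' ' run (len(line) - len(line.lstrip(' ')), exact since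
-- lstrip(' ') removes exactly that run), expand it to '&nbsp;' entities, keep the rest.
def pvLine (line : List Char) : List Char :=
  let leading : Nat := line.length - (line.dropWhile (fun c => c == ' ')).length
  if leading > 0 then
    (List.replicate leading "&nbsp;".toList).flatten ++ PySem.List.slice line (some (leading : Int)) none
  else line

def text_to_html_preserving_spaces (text : String) : String :=
  if text = "" then ""
  else
    let lines := PySem.Chars.splitOn text.toList "\n".toList
    let htmlLines := lines.foldl (fun acc line => acc ++ [pvLine line]) ([] : List (List Char))
    String.ofList (PySem.Chars.join "<br>\n".toList htmlLines)

-- ===== PORT B =====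
def text_to_html_preserving_spaces_alt (text : String) : String :=
  if text = "" then ""
  else
    let r := text.toList.foldl (fun (st : List (List Char) × Bool) ch =>
      if ch = '\n' then (st.1 ++ ["<br>\n".toList], true)
      else if st.2 = true ∧ ch = ' ' then (st.1 ++ ["&nbsp;".toList], st.2)
      else (st.1 ++ [[ch]], false)) (([], true) : List (List Char) × Bool)
    String.ofList (PySem.Chars.join [] r.1)

-- ===== PRECONDITION & SPEC =====
def Spec_text_to_html_preserving_spaces (text : String) (out : String) : Prop := out = text_to_html_preserving_spaces_alt text
instance (text : String) (out : String) : Decidable (Spec_text_to_html_preserving_spaces text out) := by unfold Spec_text_to_html_preserving_spaces; infer_instance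

-- ===== CLAIM (what is proved, stated in full; the proofs are below) =====
def Claim_equal_text_to_html_preserving_spaces : Prop := ∀ (text : String), Dom_text_to_html_preserving_spaces text → Spec_text_to_html_preserving_spaces text (text_to_html_preserving_spaces text)

-- ===== LEMMAS AND PROOFS =====

-- the common emitted stream: what both programs produce, character by character
def pvEmit : List Char → Bool → List Char
  | [], _ => []
  | c :: cs, st =>
    if c = '\n' then "<br>\n".toList ++ pvEmit cs true
    else if st = true ∧ c = ' ' then "&nbsp;".toList ++ pvEmit cs true
    else c :: pvEmit cs false

-- split on '\n' as plain structural recursion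
def pvSplitNl : List Char → List (List Char)
  | [] => [[]]
  | c :: cs => if c = '\n' then [] :: pvSplitNl cs else (pvSplitNl cs).modifyHead (c :: ·)

lemma pvSplitNl_ne_nil (cs : List Char) : pvSplitNl cs ≠ [] := by
  cases cs with
  | nil => simp [pvSplitNl]
  | cons c cs =>
    simp only [pvSplitNl]
    split_ifs
    · simp
    · cases h : pvSplitNl cs with
      | nil => exact absurd h (pvSplitNl_ne_nil cs)
      | cons a l => simp [List.modifyHead]

lemma splitOn_go_eq : ∀ (fuel : Nat) (l cur : List Char) (acc : List (List Char)),
    l.length < fuel →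
    PySem.Chars.splitOn.go "\n".toList fuel l cur acc
      = acc.reverse ++ (pvSplitNl l).modifyHead (cur.reverse ++ ·) := by
  intro fuel
  induction fuel with
  | zero => intro l cur acc h; omega
  | succ f ih =>
    intro l cur acc h
    cases l with
    | nil => simp [PySem.Chars.splitOn.go, pvSplitNl]
    | cons c rest =>
      by_cases hc : c = '\n'
      · subst hc
        rw [show PySem.Chars.splitOn.go "\n".toList (f+1) ('\n'::rest) cur acc
            = PySem.Chars.splitOn.go "\n".toList f rest [] (cur.reverse :: acc) from by
          simp [PySem.Chars.splitOn.go, List.isPrefixOf]]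
        rw [ih rest [] (cur.reverse :: acc) (by simpa using Nat.lt_of_succ_lt_succ h)]
        simp [pvSplitNl, List.modifyHead]
        cases hr : pvSplitNl rest <;> simp
      · rw [show PySem.Chars.splitOn.go "\n".toList (f+1) (c::rest) cur acc
            = PySem.Chars.splitOn.go "\n".toList f rest (c :: cur) acc from by
          simp [PySem.Chars.splitOn.go, List.isPrefixOf]
          intro hh
          exact absurd hh.symm hc]
        rw [ih rest (c::cur) acc (by simpa using Nat.lt_of_succ_lt_succ h)]
        simp only [pvSplitNl, if_neg hc]
        cases hs : pvSplitNl rest with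
        | nil => exact absurd hs (pvSplitNl_ne_nil rest)
        | cons a t => simp [List.modifyHead]

lemma splitOn_eq_pvSplitNl (cs : List Char) :
    PySem.Chars.splitOn cs "\n".toList = pvSplitNl cs := by
  rw [show PySem.Chars.splitOn cs "\n".toList
      = PySem.Chars.splitOn.go "\n".toList (cs.length + 1) cs [] [] from rfl]
  rw [splitOn_go_eq (cs.length + 1) cs [] [] (by omega)]
  cases hs : pvSplitNl cs with
  | nil => exact absurd hs (pvSplitNl_ne_nil cs)
  | cons a t => simp [List.modifyHead]

-- copy mode: once past the leading spaces, characters pass through verbatim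
lemma pvEmit_false_no_nl (z : List Char) (h : '\n' ∉ z) : pvEmit z false = z := by
  induction z with
  | nil => rfl
  | cons c z ih =>
    have hc : c ≠ '\n' := by intro hh; exact h (by simp [hh])
    simp [pvEmit, hc, ih (by intro hz; exact h (by simp [hz]))]

lemma pvEmit_false_append (z : List Char) (h : '\n' ∉ z) (rest : List Char) :
    pvEmit (z ++ '\n' :: rest) false = z ++ "<br>\n".toList ++ pvEmit rest true := by
  induction z with
  | nil => simp [pvEmit]
  | cons c z ih =>
    have hc : c ≠ '\n' := by intro hh; exact h (by simp [hh])
    simp [pvEmit, hc, ih (by intro hz; exact h (by simp [hz]))]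

lemma pvEmit_spaces (k : Nat) (z : List Char) :
    pvEmit (List.replicate k ' ' ++ z) true
      = (List.replicate k "&nbsp;".toList).flatten ++ pvEmit z true := by
  induction k with
  | zero => simp
  | succ k ih => simp [List.replicate_succ, pvEmit, ih]

lemma pvDropWhile_head {p : Char → Bool} : ∀ (l : List Char) {c : List Char} {a : Char},
    l.dropWhile p = a :: c → p a = false := by
  intro l
  induction l with
  | nil => intro c a h; simp [List.dropWhile] at h
  | cons x xs ih =>
    intro c a h
    by_cases hx : p x
    · exact ih (by simpa [List.dropWhile, hx] using h)
    · rw [List.dropWhile_cons_of_neg (by simpa using hx)] at h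
      cases h; simpa using hx

lemma pvDropEqDrop (p : Char → Bool) (l : List Char) :
    l.drop (l.takeWhile p).length = l.dropWhile p := by
  induction l with
  | nil => rfl
  | cons x xs ih => by_cases hx : p x <;> simp [hx, ih]

-- the decomposition both per-line lemmas share
lemma pvLine_decomp (line : List Char) :
    line = List.replicate (line.length - (line.dropWhile (fun c => c == ' ')).length) ' '
             ++ line.dropWhile (fun c => c == ' ')
    ∧ pvLine line
      = (List.replicate (line.length - (line.dropWhile (fun c => c == ' ')).length)
          "&nbsp;".toList).flatten ++ line.dropWhile (fun c => c == ' ') := by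
  have hlen : (line.takeWhile (fun c => c == ' ')).length
      + (line.dropWhile (fun c => c == ' ')).length = line.length := by
    have h2 := congrArg List.length (List.takeWhile_append_dropWhile (p := fun c => c == ' ') (l := line))
    rwa [List.length_append] at h2
  have hk : line.length - (line.dropWhile (fun c => c == ' ')).length
      = (line.takeWhile (fun c => c == ' ')).length := by omega
  have htake : line.takeWhile (fun c => c == ' ')
      = List.replicate (line.takeWhile (fun c => c == ' ')).length ' ' := by
    apply List.eq_replicate_of_mem
    intro b hb
    have := List.mem_takeWhile_imp hb
    simpa using this
  have hdecomp : line = List.replicate (line.length - (line.dropWhile (fun c => c == ' ')).length) ' '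
      ++ line.dropWhile (fun c => c == ' ') := by
    rw [hk, ← htake, List.takeWhile_append_dropWhile]
  refine ⟨hdecomp, ?_⟩
  unfold pvLine
  simp only [hk]
  have hslice : PySem.List.slice line (some ((line.takeWhile (fun c => c == ' ')).length : Int)) none
      = line.drop (line.takeWhile (fun c => c == ' ')).length := by
    simp [pysem]
  by_cases h0 : (line.takeWhile (fun c => c == ' ')).length > 0
  · rw [if_pos h0, hslice]
    congr 1
    exact pvDropEqDrop (fun c => c == ' ') line
  · have h00 : (line.takeWhile (fun c => c == ' ')).length = 0 := by omega
    rw [if_neg h0]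
    rw [h00, List.replicate_zero, List.flatten_nil, List.nil_append]
    have h01 : line.takeWhile (fun c => c == ' ') = [] := List.length_eq_zero_iff.mp h00
    conv_lhs => rw [← List.takeWhile_append_dropWhile (p := fun c => c == ' ') (l := line)]
    rw [h01, List.nil_append]

lemma pvLine_eq (line : List Char) (h : '\n' ∉ line) : pvEmit line true = pvLine line := by
  obtain ⟨hdec, hpl⟩ := pvLine_decomp line
  conv_lhs => rw [hdec]
  rw [pvEmit_spaces, hpl]
  congr 1
  cases ht : line.dropWhile (fun c => c == ' ') with
  | nil => rfl
  | cons a t =>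
    have ha : ¬ (a == ' ') := by simpa using pvDropWhile_head line ht
    have hmem : a :: t <:+ line := ht ▸ List.dropWhile_suffix _
    have hna : a ≠ '\n' := fun hh => h (hmem.subset (by simp [hh]))
    have hnt : '\n' ∉ t := fun hh => h (hmem.subset (by simp [hh]))
    have ha' : a ≠ ' ' := by simpa using ha
    simp [pvEmit, hna, ha', pvEmit_false_no_nl t hnt]

lemma pvLine_append (line : List Char) (h : '\n' ∉ line) (rest : List Char) :
    pvEmit (line ++ '\n' :: rest) true
      = pvLine line ++ "<br>\n".toList ++ pvEmit rest true := by
  obtain ⟨hdec, hpl⟩ := pvLine_decomp line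
  conv_lhs => rw [hdec]
  rw [List.append_assoc, pvEmit_spaces, hpl]
  cases ht : line.dropWhile (fun c => c == ' ') with
  | nil => simp [pvEmit]
  | cons a t =>
    have ha : ¬ (a == ' ') := by simpa using pvDropWhile_head line ht
    have hmem : a :: t <:+ line := ht ▸ List.dropWhile_suffix _
    have hna : a ≠ '\n' := fun hh => h (hmem.subset (by simp [hh]))
    have hnt : '\n' ∉ t := fun hh => h (hmem.subset (by simp [hh]))
    have ha' : a ≠ ' ' := by simpa using ha
    simp [pvEmit, hna, ha', pvEmit_false_append t hnt rest]

lemma pvSplitNl_no_nl (cs : List Char) (h : '\n' ∉ cs) : pvSplitNl cs = [cs] := by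
  induction cs with
  | nil => rfl
  | cons c cs ih =>
    have hc : c ≠ '\n' := by intro hh; exact h (by simp [hh])
    simp [pvSplitNl, hc, ih (by intro hz; exact h (by simp [hz])), List.modifyHead]

lemma pvSplitNl_append (line : List Char) (h : '\n' ∉ line) (rest : List Char) :
    pvSplitNl (line ++ '\n' :: rest) = line :: pvSplitNl rest := by
  induction line with
  | nil => simp [pvSplitNl]
  | cons c l ih =>
    have hc : c ≠ '\n' := by intro hh; exact h (by simp [hh])
    simp [pvSplitNl, hc, ih (by intro hz; exact h (by simp [hz])), List.modifyHead]

-- main A-side lemma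
lemma joinA_eq_pvEmit : ∀ (n : Nat) (cs : List Char), cs.length ≤ n →
    PySem.Chars.join "<br>\n".toList ((pvSplitNl cs).map pvLine) = pvEmit cs true := by
  intro n
  induction n with
  | zero =>
    intro cs h
    have : cs = [] := by cases cs <;> simp_all
    subst this
    simp [pvSplitNl, PySem.Chars.join, List.intercalate, pvLine, pvEmit]
  | succ n ih =>
    intro cs hlen
    by_cases hn : '\n' ∈ cs
    · have hline : '\n' ∉ cs.takeWhile (fun c => c ≠ '\n') := by
        intro hh
        have := List.mem_takeWhile_imp hh
        simp at this
      have hdrop : ∃ rest, cs.dropWhile (fun c => c ≠ '\n') = '\n' :: rest := by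
        cases hd : cs.dropWhile (fun c => c ≠ '\n') with
        | nil =>
          exfalso
          rw [List.dropWhile_eq_nil_iff] at hd
          exact absurd (hd '\n' hn) (by decide)
        | cons a t =>
          have ha : a = '\n' := by simpa using pvDropWhile_head cs hd
          exact ⟨t, by rw [ha]⟩
      obtain ⟨rest, hrest⟩ := hdrop
      have hcs : cs = cs.takeWhile (fun c => c ≠ '\n') ++ '\n' :: rest := by
        conv_lhs => rw [← List.takeWhile_append_dropWhile (p := fun c => c ≠ '\n') (l := cs)]
        rw [hrest]
      have hrlen : rest.length ≤ n := by
        have := congrArg List.length hcs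
        simp at this
        omega
      rw [hcs, pvSplitNl_append _ hline, List.map_cons]
      cases hm : (pvSplitNl rest).map pvLine with
      | nil => exact absurd (by simpa using hm) (pvSplitNl_ne_nil rest)
      | cons b bs =>
        rw [PySem.Chars.join_cons_cons]
        rw [← hm, ih rest hrlen]
        rw [pvLine_append _ hline]
    · rw [pvSplitNl_no_nl cs hn]
      simp only [List.map_cons, List.map_nil]
      rw [PySem.Chars.join_singleton]
      exact (pvLine_eq cs hn).symm

lemma pvJoinNilSep (parts : List (List Char)) : PySem.Chars.join [] parts = parts.flatten := by
  induction parts with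
  | nil => rfl
  | cons x l ih =>
    cases l with
    | nil => simp [PySem.Chars.join, List.intercalate]
    | cons y t =>
      simp only [PySem.Chars.join, List.intercalate] at ih ⊢
      rw [show List.intersperse ([] : List Char) (x :: y :: t)
          = x :: [] :: List.intersperse [] (y :: t) from rfl]
      simp only [List.flatten_cons, List.nil_append]
      rw [ih, List.flatten_cons]

-- B-side fold lemma
lemma bfold (cs : List Char) : ∀ (out : List (List Char)) (st : Bool),
    (cs.foldl (fun (s : List (List Char) × Bool) ch =>
      if ch = '\n' then (s.1 ++ ["<br>\n".toList], true)
      else if s.2 = true ∧ ch = ' ' then (s.1 ++ ["&nbsp;".toList], s.2)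
      else (s.1 ++ [[ch]], false)) (out, st)).1.flatten = out.flatten ++ pvEmit cs st := by
  induction cs with
  | nil => intro out st; simp [pvEmit]
  | cons c cs ih =>
    intro out st
    simp only [List.foldl_cons]
    by_cases hc : c = '\n'
    · simp only [hc]
      rw [ih]
      simp [pvEmit]
    · by_cases hs : st = true ∧ c = ' '
      · simp only [if_neg hc, if_pos hs]
        rw [ih]
        rcases hs with ⟨h1, h2⟩
        simp [pvEmit, h1, h2]
      · simp only [if_neg hc, if_neg hs]
        rw [ih]
        simp [pvEmit, hc, hs]

-- ===== VERDICT (by name: the statement is the Claim_ definition above) =====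
theorem text_to_html_preserving_spaces_spec : Claim_equal_text_to_html_preserving_spaces := by
  intro text _
  unfold Spec_text_to_html_preserving_spaces text_to_html_preserving_spaces text_to_html_preserving_spaces_alt
  by_cases h : text = ""
  · simp [h]
  · simp only [h, if_false]
    congr 1
    rw [PySem.List.foldl_append_singleton_eq_map, splitOn_eq_pvSplitNl,
        pvJoinNilSep, bfold text.toList [] true]
    simp only [List.nil_append, List.flatten_nil]
    exact joinA_eq_pvEmit text.toList.length text.toList le_rfl
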